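-- pv_equiv track=rewrite | github.com/jernejmarcic/PythonProjects | recucu.py | land_use_by_street
-- ===== SOURCE A (Python) =====
-- def land_use_by_street(addresses, land_use_data):
--     street_counts = {}
--
--     def parse_and_count(land_uses, street):
--         if street not in street_counts:
--             street_counts[street] = {'a': 0, 'b': 0, 'c': 0, 'd': 0, 'e': 0, 'f': 0, 'g': 0}
--         for land_use in land_uses:
--             for char in land_use:
--                 if char in street_counts[street]:
--                     street_counts[street][char] += 1
--
--     for address, land_use in zip(addresses, land_use_data):
--         if land_use is not None:
--             street = address.split(',')[0]  # Extracting the street name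
--             land_uses = land_use.replace(' ', '').split('/')
--             parse_and_count(land_uses, street)
--
--     return street_counts
-- ===== SOURCE B (Python) =====
-- def land_use_by_street(addresses, land_use_data):
--     # Pass 1: group rows by street, concatenating the cleaned land-use text per street.
--     combined = {}
--     for address, land_use in zip(addresses, land_use_data):
--         if land_use is None:
--             continue
--         street = address.split(',')[0]
--         text = ''.join(land_use.replace(' ', '').split('/'))
--         combined[street] = combined.get(street, '') + text
--     # Pass 2: count each land-use letter in the combined text of each street.
--     return {street: {c: text.count(c) for c in 'abcdefg'}
--             for street, text in combined.items()}
-- ===== Notes on version B (the rewrite author's own statement) =====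
-- stated objective: alternative
-- what changed: Replaces A's single pass with a nested per-char membership-test-and-increment into a dict of counter dicts by a two-pass design: pass 1 groups rows into an ordered street -> concatenated-text table, pass 2 counts each of the seven letters in each street's combined text with str.count.
import Mathlib
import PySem

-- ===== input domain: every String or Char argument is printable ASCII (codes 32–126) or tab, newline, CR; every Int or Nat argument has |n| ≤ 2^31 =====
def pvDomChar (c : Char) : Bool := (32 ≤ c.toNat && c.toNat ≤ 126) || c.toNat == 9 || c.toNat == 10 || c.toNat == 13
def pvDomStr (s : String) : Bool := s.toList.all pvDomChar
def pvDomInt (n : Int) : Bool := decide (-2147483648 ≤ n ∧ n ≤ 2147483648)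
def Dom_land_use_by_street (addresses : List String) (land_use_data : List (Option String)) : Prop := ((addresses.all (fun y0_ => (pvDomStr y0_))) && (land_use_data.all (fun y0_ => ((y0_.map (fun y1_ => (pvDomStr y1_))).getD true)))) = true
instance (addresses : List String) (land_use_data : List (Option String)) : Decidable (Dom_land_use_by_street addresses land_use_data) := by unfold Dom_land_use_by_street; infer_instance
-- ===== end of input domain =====

-- B replaces A's one-pass per-char dict-increment loop by a two-pass design (group text per
-- street, then count the seven letters per street); proved to return the same value ('alternative').

-- ===== PORT A =====
-- inner helper 'parse_and_count' of A (mutation of the closed-over dict becomes state passing)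
def land_use_parse_and_count (land_uses : List String) (street : String)
    (street_counts : PySem.Dict String (PySem.Dict String Int)) :
    PySem.Dict String (PySem.Dict String Int) :=
  let sc := if street_counts.contains street then street_counts
            else street_counts.insert street
              (PySem.Dict.mk [("a", 0), ("b", 0), ("c", 0), ("d", 0), ("e", 0), ("f", 0), ("g", 0)])
  land_uses.foldl (fun sc land_use =>
    land_use.toList.foldl (fun sc char =>
      -- 'if char in street_counts[street]: street_counts[street][char] += 1'
      if (sc.getD street PySem.Dict.empty).contains (String.ofList [char]) then
        sc.insert street ((sc.getD street PySem.Dict.empty).insert (String.ofList [char])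
          ((sc.getD street PySem.Dict.empty).getD (String.ofList [char]) 0 + 1))
      else sc) sc) sc

def land_use_by_street (addresses : List String) (land_use_data : List (Option String)) : List (String × List (String × Int)) :=
  let street_counts := (addresses.zip land_use_data).foldl (fun sc row =>
    match row.2 with
    | none => sc
    | some land_use =>
        -- sep "," is non-empty so split? is always 'some', and split output is non-empty so [0] is its head
        let street := ((PySem.Str.split? row.1 ",").getD []).headD ""
        let land_uses := (PySem.Str.split? (PySem.Str.replace land_use " " "") "/").getD []
        land_use_parse_and_count land_uses street sc) PySem.Dict.empty
  street_counts.items.map (fun p => (p.1, p.2.items))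

-- ===== PORT B =====
def land_use_by_street_alt (addresses : List String) (land_use_data : List (Option String)) : List (String × List (String × Int)) :=
  -- pass 1: ordered table street -> concatenated cleaned text
  let combined := (addresses.zip land_use_data).foldl (fun t row =>
    match row.2 with
    | none => t
    | some land_use =>
        let street := ((PySem.Str.split? row.1 ",").getD []).headD ""
        let text := PySem.Str.join "" ((PySem.Str.split? (PySem.Str.replace land_use " " "") "/").getD [])
        t.insert street (t.getD street "" ++ text)) PySem.Dict.empty
  -- pass 2: count each letter in each street's combined text
  combined.items.map (fun p =>
    (p.1, "abcdefg".toList.map (fun c => (String.ofList [c], (PySem.Str.count p.2 (String.ofList [c]) : Int)))))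

-- ===== PRECONDITION & SPEC =====
def Spec_land_use_by_street (addresses : List String) (land_use_data : List (Option String)) (out : List (String × List (String × Int))) : Prop := out = land_use_by_street_alt addresses land_use_data
instance (addresses : List String) (land_use_data : List (Option String)) (out : List (String × List (String × Int))) : Decidable (Spec_land_use_by_street addresses land_use_data out) := by unfold Spec_land_use_by_street; infer_instance

-- ===== CLAIM (what is proved, stated in full; the proofs are below) =====
def Claim_equal_land_use_by_street : Prop := ∀ (addresses : List String) (land_use_data : List (Option String)), Dom_land_use_by_street addresses land_use_data → Spec_land_use_by_street addresses land_use_data (land_use_by_street addresses land_use_data)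

-- ===== LEMMAS AND PROOFS =====

-- helpers for the proofs: the seven land-use letters, the per-text count table,
-- A's one-char counter update, and the map sending B's (street, text) entry to
-- A's (street, counter-dict) entry
def pvLetters : List Char := ['a', 'b', 'c', 'd', 'e', 'f', 'g']

def pvCnt (cs : List Char) : List (String × Int) :=
  pvLetters.map (fun x => (String.ofList [x], (cs.count x : Int)))

def pvF (p : String × String) : String × PySem.Dict String Int :=
  (p.1, PySem.Dict.mk (pvCnt p.2.toList))

def pvInner (d : PySem.Dict String Int) (c : Char) : PySem.Dict String Int :=
  if d.contains (String.ofList [c]) then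
    d.insert (String.ofList [c]) (d.getD (String.ofList [c]) 0 + 1)
  else d

lemma pv_count_go (c : Char) : ∀ (l : List Char) (acc fuel : Nat), l.length ≤ fuel →
    PySem.Chars.count.go [c] fuel l acc = acc + l.count c := by
  intro l
  induction l with
  | nil => intro acc fuel h; cases fuel <;> simp [PySem.Chars.count.go]
  | cons a t ih =>
    intro acc fuel h
    cases fuel with
    | zero => simp at h
    | succ n =>
      rw [PySem.Chars.count.go]
      simp only [List.length_cons] at h
      by_cases hc : c = a
      · subst hc
        have hp : List.isPrefixOf [c] (c :: t) = true := by simp [List.isPrefixOf]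
        rw [if_pos hp]
        simp only [List.length_singleton, List.drop_succ_cons, List.drop_zero]
        rw [ih (acc + 1) n (by omega)]
        simp
        omega
      · have hp : List.isPrefixOf [c] (a :: t) = false := by
          simp [List.isPrefixOf]
          exact fun h2 => hc h2
        rw [if_neg (by simp [hp])]
        rw [ih acc n (by omega)]
        simp [Ne.symm hc]

lemma pv_str_count_single (s : String) (c : Char) :
    PySem.Str.count s (String.ofList [c]) = s.toList.count c := by
  rw [PySem.Str.count_eq]
  have h : (String.ofList [c]).toList = [c] := by simp
  rw [h, PySem.Chars.count]
  simp [pv_count_go c s.toList 0 s.length (by simp)]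

lemma pv_join_nil (l : List (List Char)) : PySem.Chars.join [] l = l.flatten := by
  rw [PySem.Chars.join]
  induction l with
  | nil => simp [List.intercalate]
  | cons a t ih =>
    cases t with
    | nil => simp [List.intercalate]
    | cons b t2 => simp_all [List.intercalate, List.intersperse]

lemma pv_text_toList (parts : List String) :
    (PySem.Str.join "" parts).toList = (parts.map String.toList).flatten := by
  simp [PySem.Str.join, pv_join_nil]

lemma pv_key_ne {x c : Char} (h : ¬ x = c) :
    (String.ofList [x] == String.ofList [c]) = false := by
  simp only [beq_eq_false_iff_ne, ne_eq]
  intro he; apply h; have := congrArg String.toList he; simpa using this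

lemma pv_inner_cnt (u : List Char) (c : Char) :
    pvInner (PySem.Dict.mk (pvCnt u)) c = PySem.Dict.mk (pvCnt (u ++ [c])) := by
  by_cases h : c ∈ pvLetters
  · simp only [pvLetters, List.mem_cons, List.not_mem_nil, or_false] at h
    rcases h with rfl|rfl|rfl|rfl|rfl|rfl|rfl <;>
      simp [pvInner, pvCnt, pvLetters, PySem.Dict.contains, PySem.Dict.insert,
            PySem.Dict.getD, PySem.Dict.get?, List.count_append]
  · have hne : ∀ x ∈ pvLetters, (String.ofList [x] == String.ofList [c]) = false := by
      intro x hx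
      exact pv_key_ne (fun he => h (he ▸ hx))
    have hcontains : (PySem.Dict.mk (pvCnt u)).contains (String.ofList [c]) = false := by
      simp only [PySem.Dict.contains_mk, pvCnt, List.any_map, List.any_eq_false]
      intro x hx
      simpa using hne x hx
    have hcnt : pvCnt (u ++ [c]) = pvCnt u := by
      apply List.map_congr_left
      intro x hx
      have : ¬ x = c := fun he => h (he ▸ hx)
      simp [List.count_append, Ne.symm this]
    rw [pvInner, if_neg (by simp [hcontains]), hcnt]

lemma pv_inner_fold (cs : List Char) : ∀ (u : List Char),
    cs.foldl pvInner (PySem.Dict.mk (pvCnt u)) = PySem.Dict.mk (pvCnt (u ++ cs)) := by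
  induction cs with
  | nil => intro u; simp
  | cons c t ih =>
    intro u
    simp only [List.foldl_cons, pv_inner_cnt, ih (u ++ [c]), List.append_assoc,
      List.singleton_append]

lemma pv_nodup_insert {ν : Type} (d : PySem.Dict String ν) (k : String) (v : ν)
    (hnd : d.keys.Nodup) : (d.insert k v).keys.Nodup := by
  by_cases h : d.contains k
  · rw [PySem.Dict.keys_insert_of_contains d v h]; exact hnd
  · rw [PySem.Dict.keys_insert_of_not_contains d v (by simpa using h)]
    have hk : k ∉ d.keys := by
      rw [← PySem.Dict.contains_iff_mem_keys]; simpa using h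
    simp [List.nodup_append, hnd]
    exact fun a ha he => hk (he ▸ ha)

lemma pv_insert_self {ν : Type} (d : PySem.Dict String ν) (k : String) (dflt : ν)
    (hnd : d.keys.Nodup) (h : d.contains k = true) :
    d.insert k (d.getD k dflt) = d := by
  apply PySem.Dict.ext
  rw [PySem.Dict.items_insert_of_contains d _ h]
  have hpt : ∀ p ∈ d.items,
      (if (p.1 == k) = true then (k, d.getD k dflt) else p) = id p := by
    intro p hp
    by_cases hk : (p.1 == k) = true
    · have hek : p.1 = k := eq_of_beq hk
      have hv : d.getD k dflt = p.2 := by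
        have hm : (k, p.2) ∈ d.items := by rw [← hek]; exact hp
        exact PySem.Dict.getD_of_mem_items d hm hnd dflt
      rw [if_pos hk, ← hek] at *
      rw [hv]
      simp
    · simp [hk]
  rw [List.map_congr_left hpt, List.map_id]

lemma pv_outer_chars (s : String) (cs : List Char) :
    ∀ (sc : PySem.Dict String (PySem.Dict String Int)), sc.keys.Nodup → sc.contains s = true →
    cs.foldl (fun sc char =>
      if (sc.getD s PySem.Dict.empty).contains (String.ofList [char]) then
        sc.insert s ((sc.getD s PySem.Dict.empty).insert (String.ofList [char])
          ((sc.getD s PySem.Dict.empty).getD (String.ofList [char]) 0 + 1))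
      else sc) sc
    = sc.insert s (cs.foldl pvInner (sc.getD s PySem.Dict.empty)) := by
  induction cs with
  | nil =>
    intro sc hnd h
    simp only [List.foldl_nil]
    exact (pv_insert_self sc s PySem.Dict.empty hnd h).symm
  | cons c t ih =>
    intro sc hnd h
    have hstep : (if (sc.getD s PySem.Dict.empty).contains (String.ofList [c]) then
        sc.insert s ((sc.getD s PySem.Dict.empty).insert (String.ofList [c])
          ((sc.getD s PySem.Dict.empty).getD (String.ofList [c]) 0 + 1))
      else sc) = sc.insert s (pvInner (sc.getD s PySem.Dict.empty) c) := by
      rw [pvInner]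
      by_cases hc : (sc.getD s PySem.Dict.empty).contains (String.ofList [c]) = true
      · rw [if_pos hc, if_pos hc]
      · rw [if_neg hc, if_neg hc]
        exact (pv_insert_self sc s PySem.Dict.empty hnd h).symm
    simp only [List.foldl_cons, hstep]
    rw [ih (sc.insert s (pvInner (sc.getD s PySem.Dict.empty) c))
        (pv_nodup_insert _ _ _ hnd)
        (by rw [PySem.Dict.contains_insert]; simp)]
    rw [PySem.Dict.getD_insert_self, PySem.Dict.insert_insert_self]

lemma pv_contains_map (l : List (String × String)) (s : String) :
    (PySem.Dict.mk (l.map pvF)).contains s = (PySem.Dict.mk l).contains s := by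
  simp [PySem.Dict.contains, List.any_map, pvF, Function.comp_def]

lemma pv_get?_map (l : List (String × String)) (s : String) :
    (PySem.Dict.mk (l.map pvF)).get? s
      = ((PySem.Dict.mk l).get? s).map (fun txt => PySem.Dict.mk (pvCnt txt.toList)) := by
  induction l with
  | nil => simp [PySem.Dict.get?]
  | cons a t ih =>
    obtain ⟨k, v⟩ := a
    have hh : pvF (k, v) = (k, PySem.Dict.mk (pvCnt v.toList)) := rfl
    simp only [List.map_cons, hh, PySem.Dict.get?_mk_cons]
    by_cases hk : (k == s) = true
    · rw [if_pos hk, if_pos hk]; rfl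
    · rw [if_neg hk, if_neg hk]; exact ih

lemma pv_insert_map (l : List (String × String)) (s txt : String) :
    (PySem.Dict.mk (l.map pvF)).insert s (PySem.Dict.mk (pvCnt txt.toList))
      = PySem.Dict.mk ((((PySem.Dict.mk l).insert s txt)).items.map pvF) := by
  apply PySem.Dict.ext
  by_cases h : (PySem.Dict.mk l).contains s = true
  · rw [PySem.Dict.items_insert_of_contains _ _ ((pv_contains_map l s).trans h),
        PySem.Dict.items_insert_of_contains _ _ h]
    show List.map _ (l.map pvF) = List.map pvF (List.map _ l)
    rw [List.map_map, List.map_map]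
    apply List.map_congr_left
    intro p _
    by_cases hk : p.1 = s
    · simp [pvF, hk]
    · simp [pvF, hk]
  · rw [PySem.Dict.items_insert_of_not_contains _ _
          (by rw [pv_contains_map l s]; exact Bool.eq_false_iff.mpr h),
        PySem.Dict.items_insert_of_not_contains _ _ (Bool.eq_false_iff.mpr h)]
    show List.map pvF l ++ _ = List.map pvF (l ++ [(s, txt)])
    simp [pvF]

lemma pv_row_core (t : PySem.Dict String String) (s : String) (parts : List String)
    (hnd : t.keys.Nodup) (hc : t.contains s = true) :
    parts.foldl (fun sc land_use =>
      land_use.toList.foldl (fun sc char =>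
        if (sc.getD s PySem.Dict.empty).contains (String.ofList [char]) then
          sc.insert s ((sc.getD s PySem.Dict.empty).insert (String.ofList [char])
            ((sc.getD s PySem.Dict.empty).getD (String.ofList [char]) 0 + 1))
        else sc) sc) (PySem.Dict.mk (t.items.map pvF))
    = PySem.Dict.mk ((t.insert s (t.getD s "" ++ PySem.Str.join "" parts)).items.map pvF) := by
  obtain ⟨txt, htxt⟩ : ∃ txt, t.get? s = some txt := by
    have := PySem.Dict.contains_eq_isSome_get? t s
    rw [hc] at this
    exact Option.isSome_iff_exists.mp this.symm
  have hmk : t = PySem.Dict.mk t.items := rfl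
  have hcm : (PySem.Dict.mk (t.items.map pvF)).contains s = true := by
    rw [pv_contains_map]; exact hc
  have hgd : (PySem.Dict.mk (t.items.map pvF)).getD s PySem.Dict.empty
      = PySem.Dict.mk (pvCnt txt.toList) := by
    rw [PySem.Dict.getD_eq_get?_getD, pv_get?_map, ← hmk, htxt]; rfl
  have hnd' : (PySem.Dict.mk (t.items.map pvF)).keys.Nodup := by
    rw [PySem.Dict.keys_mk, List.map_map]
    have : (List.map (Prod.fst ∘ pvF) t.items) = t.keys := rfl
    rw [this]; exact hnd
  have hfold : parts.foldl (fun sc land_use =>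
      land_use.toList.foldl (fun sc char =>
        if (sc.getD s PySem.Dict.empty).contains (String.ofList [char]) then
          sc.insert s ((sc.getD s PySem.Dict.empty).insert (String.ofList [char])
            ((sc.getD s PySem.Dict.empty).getD (String.ofList [char]) 0 + 1))
        else sc) sc) (PySem.Dict.mk (t.items.map pvF))
    = ((parts.map String.toList).flatten).foldl (fun sc char =>
        if (sc.getD s PySem.Dict.empty).contains (String.ofList [char]) then
          sc.insert s ((sc.getD s PySem.Dict.empty).insert (String.ofList [char])
            ((sc.getD s PySem.Dict.empty).getD (String.ofList [char]) 0 + 1))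
        else sc) (PySem.Dict.mk (t.items.map pvF)) := by
    rw [List.foldl_flatten, List.foldl_map]
  rw [hfold, pv_outer_chars s _ _ hnd' hcm, hgd, pv_inner_fold, ← pv_text_toList,
      ← String.toList_append]
  have hgd2 : t.getD s "" = txt := by rw [PySem.Dict.getD_eq_get?_getD, htxt]; rfl
  rw [pv_insert_map t.items s (txt ++ PySem.Str.join "" parts), ← hmk, hgd2]

lemma pv_cnt_nil : PySem.Dict.mk (pvCnt ([] : List Char))
    = PySem.Dict.mk [("a", 0), ("b", 0), ("c", 0), ("d", 0), ("e", 0), ("f", 0), ("g", 0)] := by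
  decide

lemma pv_row (t : PySem.Dict String String) (s : String) (parts : List String)
    (hnd : t.keys.Nodup) :
    land_use_parse_and_count parts s (PySem.Dict.mk (t.items.map pvF))
      = PySem.Dict.mk ((t.insert s (t.getD s "" ++ PySem.Str.join "" parts)).items.map pvF) := by
  rw [land_use_parse_and_count]
  by_cases hc : t.contains s = true
  · rw [if_pos (by rw [pv_contains_map]; exact hc)]
    exact pv_row_core t s parts hnd hc
  · have hcf : t.contains s = false := Bool.eq_false_iff.mpr hc
    rw [if_neg (by rw [pv_contains_map, hcf]; simp)]
    rw [← pv_cnt_nil]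
    have h2 : (PySem.Dict.mk (t.items.map pvF)).insert s (PySem.Dict.mk (pvCnt []))
        = PySem.Dict.mk (((t.insert s "")).items.map pvF) := pv_insert_map t.items s ""
    rw [h2]
    have h1 := pv_row_core (t.insert s "") s parts (pv_nodup_insert t s "" hnd)
      (by rw [PySem.Dict.contains_insert]; simp)
    rw [h1, PySem.Dict.getD_insert_self, PySem.Dict.insert_insert_self]
    rw [PySem.Dict.getD_of_not_contains t "" hcf]

lemma pv_main (rows : List (String × Option String)) :
    ∀ (t : PySem.Dict String String), t.keys.Nodup →
    rows.foldl (fun sc row =>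
      match row.2 with
      | none => sc
      | some land_use =>
          let street := ((PySem.Str.split? row.1 ",").getD []).headD ""
          let land_uses := (PySem.Str.split? (PySem.Str.replace land_use " " "") "/").getD []
          land_use_parse_and_count land_uses street sc) (PySem.Dict.mk (t.items.map pvF))
    = PySem.Dict.mk ((rows.foldl (fun t row =>
        match row.2 with
        | none => t
        | some land_use =>
            let street := ((PySem.Str.split? row.1 ",").getD []).headD ""
            let text := PySem.Str.join "" ((PySem.Str.split? (PySem.Str.replace land_use " " "") "/").getD [])
            t.insert street (t.getD street "" ++ text)) t).items.map pvF) := by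
  induction rows with
  | nil => intro t _; rfl
  | cons r rs ih =>
    obtain ⟨addr, olu⟩ := r
    cases olu with
    | none => intro t hnd; exact ih t hnd
    | some lu =>
      intro t hnd
      have hrow := pv_row t (((PySem.Str.split? addr ",").getD []).headD "")
        ((PySem.Str.split? (PySem.Str.replace lu " " "") "/").getD []) hnd
      calc rs.foldl _ (land_use_parse_and_count
            ((PySem.Str.split? (PySem.Str.replace lu " " "") "/").getD [])
            (((PySem.Str.split? addr ",").getD []).headD "")
            (PySem.Dict.mk (t.items.map pvF)))
          = _ := by rw [hrow]; exact ih _ (pv_nodup_insert _ _ _ hnd)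

lemma pv_out (l : List (String × String)) :
    (l.map pvF).map (fun p => (p.1, p.2.items))
      = l.map (fun p => (p.1, "abcdefg".toList.map (fun c =>
          (String.ofList [c], (PySem.Str.count p.2 (String.ofList [c]) : Int))))) := by
  rw [List.map_map]
  apply List.map_congr_left
  intro p _
  have hlet : "abcdefg".toList = pvLetters := rfl
  simp only [Function.comp_def, pvF, hlet]
  show (p.1, pvCnt p.2.toList) = _
  rw [pvCnt]
  congr 1
  apply List.map_congr_left
  intro x _
  rw [pv_str_count_single]

-- ===== VERDICT (by name: the statement is the Claim_ definition above) =====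
theorem land_use_by_street_spec : Claim_equal_land_use_by_street := by
  intro addresses land_use_data _
  unfold Spec_land_use_by_street
  have hm := pv_main (addresses.zip land_use_data) PySem.Dict.empty
    (by exact List.nodup_nil)
  simp only [land_use_by_street, land_use_by_street_alt]
  rw [show (PySem.Dict.empty : PySem.Dict String (PySem.Dict String Int))
      = PySem.Dict.mk (List.map pvF PySem.Dict.empty.items) from rfl]
  rw [hm]
  exact pv_out _
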